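-- pv_equiv track=rewrite | github.com/NikonD850/PBVS_HISR26 | v1/test_h5_no_gdal.py | _find_lr_dataset
-- ===== SOURCE A (Python) =====
-- def _looks_like_cube(shape):
--     return len(shape) in (3, 4)
--
-- def _find_lr_dataset(infos):
--     for name, shape, _dtype, _comp in infos:
--         if name == "LR" and _looks_like_cube(shape):
--             return name
--
--     keywords = ["lr", "low", "data", "input"]
--     for kw in keywords:
--         for name, shape, _dtype, _comp in infos:
--             if kw in name.lower() and _looks_like_cube(shape):
--                 return name
--
--     for name, shape, _dtype, _comp in infos:
--         if _looks_like_cube(shape):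
--             return name
--
--     return None
-- ===== SOURCE B (Python) =====
-- _KEYWORDS = ["lr", "low", "data", "input"]
--
-- def _find_lr_dataset(infos):
--     best = None  # (priority, name); lower priority wins, earliest wins ties
--     for name, shape, _dtype, _comp in infos:
--         if len(shape) not in (3, 4):
--             continue
--         if name == "LR":
--             p = 0
--         else:
--             p = next((i + 1 for i, kw in enumerate(_KEYWORDS) if kw in name.lower()), 5)
--         if best is None or p < best[0]:
--             best = (p, name)
--     return best[1] if best is not None else None
-- ===== Notes on version B (the rewrite author's own statement) =====
-- stated objective: simpler
-- what changed: Replaced A's six sequential scans (exact-LR pass, one pass per keyword, cube fallback) with a single pass that assigns each cube-shaped item a numeric priority (0 for 'LR', 1+first-matching-keyword index, else 5) and keeps the earliest minimum.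
import Mathlib
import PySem

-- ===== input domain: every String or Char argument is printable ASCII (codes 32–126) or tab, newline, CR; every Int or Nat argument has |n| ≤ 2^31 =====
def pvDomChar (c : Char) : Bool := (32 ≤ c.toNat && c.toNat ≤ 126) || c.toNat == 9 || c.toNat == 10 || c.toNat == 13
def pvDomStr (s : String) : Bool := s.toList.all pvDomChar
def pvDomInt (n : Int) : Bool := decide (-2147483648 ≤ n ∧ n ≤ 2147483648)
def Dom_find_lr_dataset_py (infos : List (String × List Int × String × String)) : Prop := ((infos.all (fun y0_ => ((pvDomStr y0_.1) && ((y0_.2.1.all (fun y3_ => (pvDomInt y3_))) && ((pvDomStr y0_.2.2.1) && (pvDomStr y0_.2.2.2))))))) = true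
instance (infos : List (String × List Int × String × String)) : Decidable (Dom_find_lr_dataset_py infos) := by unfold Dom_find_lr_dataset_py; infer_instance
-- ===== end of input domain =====

-- B replaces A's six sequential scans by one pass tracking the minimum-priority cube item (objective: simpler).

-- ===== PORT A =====
-- helper _looks_like_cube(shape): len(shape) in (3, 4)
def pvLooksLikeCube (shape : List Int) : Bool :=
  shape.length == 3 || shape.length == 4

-- A's middle block: 'for kw in keywords: for name, shape, _, _ in infos: if kw in name.lower() and cube: return name'
def pvKwLoop (kws : List String) (infos : List (String × List Int × String × String)) : Option String :=
  match kws with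
  | [] => none
  | kw :: rest =>
    match infos.find? (fun it => PySem.Str.isIn kw (PySem.Str.lower it.1) && pvLooksLikeCube it.2.1) with
    | some it => some it.1
    | none => pvKwLoop rest infos

def find_lr_dataset_py (infos : List (String × List Int × String × String)) : Option String :=
  match infos.find? (fun it => it.1 == "LR" && pvLooksLikeCube it.2.1) with
  | some it => some it.1
  | none =>
    match pvKwLoop ["lr", "low", "data", "input"] infos with
    | some n => some n
    | none =>
      match infos.find? (fun it => pvLooksLikeCube it.2.1) with
      | some it => some it.1
      | none => none

-- ===== PORT B =====
-- next((i + 1 for i, kw in enumerate(_KEYWORDS) if kw in low), 5)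
def pvKwIdx (kws : List String) (i : Nat) (low : String) : Nat :=
  match kws with
  | [] => 5
  | kw :: rest => if PySem.Str.isIn kw low then i + 1 else pvKwIdx rest (i + 1) low

-- priority of one cube-shaped item
def pvPrio (name : String) : Nat :=
  if name == "LR" then 0 else pvKwIdx ["lr", "low", "data", "input"] 0 (PySem.Str.lower name)

def find_lr_dataset_py_alt (infos : List (String × List Int × String × String)) : Option String :=
  let best := infos.foldl (fun (best : Option (Nat × String)) it =>
    if it.2.1.length == 3 || it.2.1.length == 4 then
      let p := pvPrio it.1
      match best with
      | none => some (p, it.1)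
      | some b => if p < b.1 then some (p, it.1) else some b
    else best) none
  match best with
  | some b => some b.2
  | none => none

-- ===== PRECONDITION & SPEC =====
def Spec_find_lr_dataset_py (infos : List (String × List Int × String × String)) (out : Option String) : Prop := out = find_lr_dataset_py_alt infos
instance (infos : List (String × List Int × String × String)) (out : Option String) : Decidable (Spec_find_lr_dataset_py infos out) := by unfold Spec_find_lr_dataset_py; infer_instance

-- ===== CLAIM (what is proved, stated in full; the proofs are below) =====
def Claim_equal_find_lr_dataset_py : Prop := ∀ (infos : List (String × List Int × String × String)), Dom_find_lr_dataset_py infos → Spec_find_lr_dataset_py infos (find_lr_dataset_py infos)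

-- ===== LEMMAS AND PROOFS =====

-- earliest item of minimal priority, computed by right recursion (head wins ties)
def pvCP (b c : Nat × String) : Nat × String := if c.1 < b.1 then c else b

def pvBestOf : List (String × List Int × String × String) → Option (Nat × String)
  | [] => none
  | it :: l =>
    if pvLooksLikeCube it.2.1 then
      match pvBestOf l with
      | none => some (pvPrio it.1, it.1)
      | some c => some (pvCP (pvPrio it.1, it.1) c)
    else pvBestOf l

theorem pvCP_assoc (b c d : Nat × String) : pvCP (pvCP b c) d = pvCP b (pvCP c d) := by
  simp only [pvCP]; split_ifs <;> first | rfl | omega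

-- B's fold equals pvBestOf
theorem pvFold_some (l : List (String × List Int × String × String)) (b : Nat × String) :
    l.foldl (fun (best : Option (Nat × String)) it =>
      if it.2.1.length == 3 || it.2.1.length == 4 then
        match best with
        | none => some (pvPrio it.1, it.1)
        | some c => if pvPrio it.1 < c.1 then some (pvPrio it.1, it.1) else some c
      else best) (some b) =
    some (match pvBestOf l with | none => b | some c => pvCP b c) := by
  induction l generalizing b with
  | nil => rfl
  | cons it l ih =>
    cases h : (it.2.1.length == 3 || it.2.1.length == 4) with
    | false =>
      simp only [List.foldl_cons, h, Bool.false_eq_true, if_false]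
      rw [ih]
      simp only [pvBestOf, pvLooksLikeCube, h, Bool.false_eq_true, if_false]
    | true =>
      simp only [List.foldl_cons, h, if_true]
      have hstep : (if pvPrio it.1 < b.1 then some (pvPrio it.1, it.1) else some b)
          = some (pvCP b (pvPrio it.1, it.1)) := by
        simp only [pvCP]; split_ifs <;> rfl
      rw [hstep, ih]
      simp only [pvBestOf, pvLooksLikeCube, h, if_true]
      cases pvBestOf l with
      | none => rfl
      | some c => simp only [pvCP_assoc]

theorem pvFold_none (l : List (String × List Int × String × String)) :
    l.foldl (fun (best : Option (Nat × String)) it =>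
      if it.2.1.length == 3 || it.2.1.length == 4 then
        match best with
        | none => some (pvPrio it.1, it.1)
        | some c => if pvPrio it.1 < c.1 then some (pvPrio it.1, it.1) else some c
      else best) none = pvBestOf l := by
  induction l with
  | nil => rfl
  | cons it l ih =>
    cases h : (it.2.1.length == 3 || it.2.1.length == 4) with
    | false =>
      simp only [List.foldl_cons, h, Bool.false_eq_true, if_false, ih,
        pvBestOf, pvLooksLikeCube]
    | true =>
      simp only [List.foldl_cons, h, if_true]
      rw [pvFold_some]
      simp only [pvBestOf, pvLooksLikeCube, h, if_true]
      cases pvBestOf l with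
      | none => rfl
      | some c => simp only [pvCP]

theorem alt_eq_bestOf (infos : List (String × List Int × String × String)) :
    find_lr_dataset_py_alt infos = (pvBestOf infos).map (·.2) := by
  simp only [find_lr_dataset_py_alt]
  rw [pvFold_none]
  cases pvBestOf infos <;> rfl

-- pvBestOf characterisation
theorem pvBestOf_eq_none_iff (l : List (String × List Int × String × String)) :
    pvBestOf l = none ↔ ∀ it ∈ l, pvLooksLikeCube it.2.1 = false := by
  induction l with
  | nil => simp [pvBestOf]
  | cons a l ih =>
    simp only [pvBestOf]
    by_cases h : pvLooksLikeCube a.2.1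
    · rw [if_pos h]
      constructor
      · intro hc; cases hbl : pvBestOf l <;> simp [hbl] at hc
      · intro hall; exact absurd h (by simp [hall a (List.mem_cons_self)])
    · rw [if_neg h, ih]
      have hf : pvLooksLikeCube a.2.1 = false := by simpa using h
      constructor
      · intro hall it hit
        rcases List.mem_cons.mp hit with rfl | hit'
        · exact hf
        · exact hall it hit'
      · intro hall it hit
        exact hall it (List.mem_cons_of_mem _ hit)

theorem pvBestOf_min (l : List (String × List Int × String × String)) (q : Nat) (n : String)
    (hb : pvBestOf l = some (q, n)) :
    ∀ it ∈ l, pvLooksLikeCube it.2.1 = true → q ≤ pvPrio it.1 := by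
  induction l generalizing q n with
  | nil => simp [pvBestOf] at hb
  | cons a l ih =>
    intro it hit hc
    simp only [pvBestOf] at hb
    by_cases ha : pvLooksLikeCube a.2.1
    · rw [if_pos ha] at hb
      cases hbl : pvBestOf l with
      | none =>
        rw [hbl] at hb
        injection hb with hb
        have hq : q = pvPrio a.1 := (congrArg Prod.fst hb).symm
        cases hit with
        | head => omega
        | tail _ h =>
          rw [(pvBestOf_eq_none_iff l).mp hbl it h] at hc; cases hc
      | some c =>
        rw [hbl] at hb
        injection hb with hb
        have hq : q ≤ pvPrio a.1 ∧ q ≤ c.1 := by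
          simp only [pvCP] at hb
          split_ifs at hb with hlt <;>
            (have := congrArg Prod.fst hb; simp at this; omega)
        cases hit with
        | head => exact hq.1
        | tail _ h => exact le_trans hq.2 (ih c.1 c.2 (by rw [hbl]) it h hc)
    · rw [if_neg ha] at hb
      cases hit with
      | head => exact absurd hc ha
      | tail _ h => exact ih q n hb it h hc

theorem pvBestOf_find (l : List (String × List Int × String × String)) (q : Nat) (n : String)
    (hb : pvBestOf l = some (q, n)) :
    (l.find? (fun it => pvLooksLikeCube it.2.1 && (pvPrio it.1 == q))).map (·.1) = some n := by
  induction l generalizing q n with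
  | nil => simp [pvBestOf] at hb
  | cons a l ih =>
    simp only [pvBestOf] at hb
    by_cases ha : pvLooksLikeCube a.2.1
    · rw [if_pos ha] at hb
      cases hbl : pvBestOf l with
      | none =>
        rw [hbl] at hb
        injection hb with hb
        have h1 : pvPrio a.1 = q := congrArg Prod.fst hb
        have h2 : a.1 = n := congrArg Prod.snd hb
        rw [List.find?_cons_of_pos (by simp [ha, h1])]
        simp [h2]
      | some c =>
        rw [hbl] at hb
        injection hb with hb
        simp only [pvCP] at hb
        split_ifs at hb with hlt
        · -- best comes from the tail: c = (q, n), c.1 < pvPrio a.1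
          have h1 : c.1 = q := congrArg Prod.fst hb
          rw [List.find?_cons_of_neg (by simp [ha]; omega)]
          have h2 : c.2 = n := congrArg Prod.snd hb
          rw [← h1, ← h2]
          exact ih c.1 c.2 (by rw [hbl])
        · have h1 : pvPrio a.1 = q := congrArg Prod.fst hb
          have h2 : a.1 = n := congrArg Prod.snd hb
          rw [List.find?_cons_of_pos (by simp [ha, h1])]
          simp [h2]
    · rw [if_neg ha] at hb
      have hf : pvLooksLikeCube a.2.1 = false := by simpa using ha
      rw [List.find?_cons_of_neg (by simp [hf])]
      exact ih q n hb

-- priority facts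
theorem pvKwIdx_le (low : String) : pvKwIdx ["lr", "low", "data", "input"] 0 low ≤ 5 := by
  simp only [pvKwIdx]; split_ifs <;> omega

theorem pvPrio_le (name : String) : pvPrio name ≤ 5 := by
  simp only [pvPrio]; split_ifs with h
  · omega
  · exact pvKwIdx_le _

-- unfolding of the keyword index on the literal list
theorem pvKwIdx_eq (low : String) :
    pvKwIdx ["lr", "low", "data", "input"] 0 low =
      if PySem.Str.isIn "lr" low then 1
      else if PySem.Str.isIn "low" low then 2
      else if PySem.Str.isIn "data" low then 3
      else if PySem.Str.isIn "input" low then 4 else 5 := by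
  simp only [pvKwIdx]

-- pvPrio = 0 iff name is "LR"
theorem pvPrio_eq_zero_iff (name : String) : pvPrio name = 0 ↔ name = "LR" := by
  simp only [pvPrio]
  split_ifs with h
  · simpa using h
  · rw [pvKwIdx_eq]
    constructor
    · intro hz; split_ifs at hz
    · intro hn; exact absurd (by simp [hn] : (name == "LR") = true) (by simp [h])

-- matching keyword j gives priority ≤ j+1 (for non-"LR" names); and conversely
theorem pvPrio_of_kw (name : String) (j : Nat) (hj : j < 4)
    (hm : PySem.Str.isIn (["lr", "low", "data", "input"].get ⟨j, by simpa using hj⟩) (PySem.Str.lower name) = true)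
    (hn : (name == "LR") = false) : pvPrio name ≤ j + 1 := by
  simp only [pvPrio, hn, Bool.false_eq_true, if_false, pvKwIdx_eq]
  interval_cases j <;> simp_all <;> split_ifs <;> simp_all

theorem pvPrio_kw_of_eq (name : String) (j : Nat) (hj : j < 4)
    (hp : pvPrio name = j + 1) :
    PySem.Str.isIn (["lr", "low", "data", "input"].get ⟨j, by simpa using hj⟩) (PySem.Str.lower name) = true := by
  have hn : (name == "LR") = false := by
    by_contra h
    have : name = "LR" := by simpa using (Bool.not_eq_false _).mp h
    rw [(pvPrio_eq_zero_iff name).mpr this] at hp; omega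
  simp only [pvPrio, hn, Bool.false_eq_true, if_false, pvKwIdx_eq] at hp
  interval_cases j <;> (split_ifs at hp <;> simp_all)

theorem find?_congr_mem {α : Type} (l : List α) (p q : α → Bool)
    (h : ∀ a ∈ l, p a = q a) : l.find? p = l.find? q := by
  induction l with
  | nil => rfl
  | cons a l ih =>
    simp only [List.find?_cons, h a (by simp)]
    cases q a <;> simp [ih (fun x hx => h x (List.mem_cons_of_mem _ hx))]

-- find? lemmas used by the case analysis on the minimal priority q
theorem pred0_none (infos : List (String × List Int × String × String)) (q : Nat)
    (hmin : ∀ it ∈ infos, pvLooksLikeCube it.2.1 = true → q ≤ pvPrio it.1) (hq : 1 ≤ q) :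
    infos.find? (fun it => it.1 == "LR" && pvLooksLikeCube it.2.1) = none := by
  refine List.find?_eq_none.mpr fun it hit hp => ?_
  exact by
    have h1 := Bool.and_elim_left hp
    have h2 := Bool.and_elim_right hp
    have hm := hmin it hit h2
    have hz : pvPrio it.1 = 0 := (pvPrio_eq_zero_iff it.1).mpr (by simpa using h1)
    omega

theorem pred0_eq (infos : List (String × List Int × String × String)) :
    infos.find? (fun it => it.1 == "LR" && pvLooksLikeCube it.2.1) =
    infos.find? (fun it => pvLooksLikeCube it.2.1 && (pvPrio it.1 == 0)) :=
  find?_congr_mem _ _ _ fun it _ => by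
    cases hc : pvLooksLikeCube it.2.1
    · simp
    · simp only [Bool.and_true, Bool.true_and]
      by_cases h : it.1 = "LR"
      · have hz : pvPrio it.1 = 0 := (pvPrio_eq_zero_iff it.1).mpr h
        rw [h] at hz
        simp [h, hz]
      · have hnz : pvPrio it.1 ≠ 0 := fun hz => h ((pvPrio_eq_zero_iff it.1).mp hz)
        simp [h, hnz]

theorem kwfind_none (infos : List (String × List Int × String × String)) (q : Nat)
    (hmin : ∀ it ∈ infos, pvLooksLikeCube it.2.1 = true → q ≤ pvPrio it.1)
    (kw : String) (j : Nat) (hj : j < 4)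
    (hkw : ["lr", "low", "data", "input"][j]? = some kw) (hlt : j + 1 < q) :
    infos.find? (fun it => PySem.Str.isIn kw (PySem.Str.lower it.1) && pvLooksLikeCube it.2.1) = none := by
  refine List.find?_eq_none.mpr fun it hit hp => ?_
  exact by
    have h1 := Bool.and_elim_left hp
    have h2 := Bool.and_elim_right hp
    have hm := hmin it hit h2
    by_cases hlr : it.1 = "LR"
    · have hz : pvPrio it.1 = 0 := (pvPrio_eq_zero_iff it.1).mpr hlr
      omega
    · have hkw' : ["lr", "low", "data", "input"].get ⟨j, by simpa using hj⟩ = kw := by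
        interval_cases j <;> simp_all
      have : pvPrio it.1 ≤ j + 1 :=
        pvPrio_of_kw it.1 j hj (by rw [hkw']; exact h1) (by simp [hlr])
      omega

theorem kwfind_eq (infos : List (String × List Int × String × String)) (q : Nat)
    (hmin : ∀ it ∈ infos, pvLooksLikeCube it.2.1 = true → q ≤ pvPrio it.1)
    (kw : String) (j : Nat) (hj : j < 4)
    (hkw : ["lr", "low", "data", "input"][j]? = some kw) (hq : q = j + 1) :
    infos.find? (fun it => PySem.Str.isIn kw (PySem.Str.lower it.1) && pvLooksLikeCube it.2.1) =
    infos.find? (fun it => pvLooksLikeCube it.2.1 && (pvPrio it.1 == q)) :=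
  find?_congr_mem _ _ _ fun it hit => by
    have hkw' : ["lr", "low", "data", "input"].get ⟨j, by simpa using hj⟩ = kw := by
      interval_cases j <;> simp_all
    cases hc : pvLooksLikeCube it.2.1
    · simp
    · simp only [Bool.and_true, Bool.true_and]
      have hm := hmin it hit hc
      by_cases hlr : it.1 = "LR"
      · have hz : pvPrio it.1 = 0 := (pvPrio_eq_zero_iff it.1).mpr hlr
        omega
      · cases hi : PySem.Str.isIn kw (PySem.Str.lower it.1)
        · have hne : pvPrio it.1 ≠ q := fun he => by
            have := pvPrio_kw_of_eq it.1 j hj (by omega)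
            rw [hkw'] at this
            rw [this] at hi
            cases hi
          simp [hne]
        · have hle : pvPrio it.1 ≤ j + 1 :=
            pvPrio_of_kw it.1 j hj (by rw [hkw']; exact hi) (by simp [hlr])
          have : pvPrio it.1 = q := by omega
          simp [this]

theorem fallback_eq (infos : List (String × List Int × String × String))
    (hmin : ∀ it ∈ infos, pvLooksLikeCube it.2.1 = true → 5 ≤ pvPrio it.1) :
    infos.find? (fun it => pvLooksLikeCube it.2.1) =
    infos.find? (fun it => pvLooksLikeCube it.2.1 && (pvPrio it.1 == 5)) :=
  find?_congr_mem _ _ _ fun it hit => by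
    cases hc : pvLooksLikeCube it.2.1
    · simp
    · have h5 : pvPrio it.1 = 5 := le_antisymm (pvPrio_le it.1) (hmin it hit hc)
      simp [h5]

-- ===== main proof =====
theorem a_eq_bestOf (infos : List (String × List Int × String × String)) :
    find_lr_dataset_py infos = (pvBestOf infos).map (·.2) := by
  cases hb : pvBestOf infos with
  | none =>
    have hall := (pvBestOf_eq_none_iff infos).mp hb
    have hx : ∀ (f : String × List Int × String × String → Bool),
        infos.find? (fun it => f it && pvLooksLikeCube it.2.1) = none := fun f =>
      List.find?_eq_none.mpr fun it hit hp => by simp [hall it hit] at hp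
    have h2 : infos.find? (fun it => pvLooksLikeCube it.2.1) = none :=
      List.find?_eq_none.mpr fun it hit hp => by simp [hall it hit] at hp
    simp only [find_lr_dataset_py, pvKwLoop, hx, h2, Option.map_none]
  | some qn =>
    obtain ⟨q, n⟩ := qn
    have hmin := pvBestOf_min infos q n hb
    have hfind := pvBestOf_find infos q n hb
    simp only [Option.map_some]
    have hq5 : q ≤ 5 := by
      cases hf : infos.find? (fun it => pvLooksLikeCube it.2.1 && (pvPrio it.1 == q)) with
      | none => rw [hf] at hfind; simp at hfind
      | some it0 =>
        have hp := List.find?_some hf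
        have : pvPrio it0.1 = q := by simpa using Bool.and_elim_right hp
        have := pvPrio_le it0.1
        omega
    interval_cases q
    · rw [find_lr_dataset_py, pred0_eq infos]
      cases hf : infos.find? (fun it => pvLooksLikeCube it.2.1 && (pvPrio it.1 == 0)) with
      | none => rw [hf] at hfind; simp at hfind
      | some it0 => rw [hf] at hfind; simpa using hfind
    · have h0 := pred0_none infos 1 hmin (by omega)
      have k0 := kwfind_eq infos 1 hmin "lr" 0 (by omega) (by rfl) rfl
      simp only [find_lr_dataset_py, pvKwLoop, h0, k0]
      cases hf : infos.find? (fun it => pvLooksLikeCube it.2.1 && (pvPrio it.1 == 1)) with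
      | none => rw [hf] at hfind; simp at hfind
      | some it0 => rw [hf] at hfind; simpa using hfind
    · have h0 := pred0_none infos 2 hmin (by omega)
      have k0 := kwfind_none infos 2 hmin "lr" 0 (by omega) (by rfl) (by omega)
      have k1 := kwfind_eq infos 2 hmin "low" 1 (by omega) (by rfl) rfl
      simp only [find_lr_dataset_py, pvKwLoop, h0, k0, k1]
      cases hf : infos.find? (fun it => pvLooksLikeCube it.2.1 && (pvPrio it.1 == 2)) with
      | none => rw [hf] at hfind; simp at hfind
      | some it0 => rw [hf] at hfind; simpa using hfind
    · have h0 := pred0_none infos 3 hmin (by omega)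
      have k0 := kwfind_none infos 3 hmin "lr" 0 (by omega) (by rfl) (by omega)
      have k1 := kwfind_none infos 3 hmin "low" 1 (by omega) (by rfl) (by omega)
      have k2 := kwfind_eq infos 3 hmin "data" 2 (by omega) (by rfl) rfl
      simp only [find_lr_dataset_py, pvKwLoop, h0, k0, k1, k2]
      cases hf : infos.find? (fun it => pvLooksLikeCube it.2.1 && (pvPrio it.1 == 3)) with
      | none => rw [hf] at hfind; simp at hfind
      | some it0 => rw [hf] at hfind; simpa using hfind
    · have h0 := pred0_none infos 4 hmin (by omega)
      have k0 := kwfind_none infos 4 hmin "lr" 0 (by omega) (by rfl) (by omega)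
      have k1 := kwfind_none infos 4 hmin "low" 1 (by omega) (by rfl) (by omega)
      have k2 := kwfind_none infos 4 hmin "data" 2 (by omega) (by rfl) (by omega)
      have k3 := kwfind_eq infos 4 hmin "input" 3 (by omega) (by rfl) rfl
      simp only [find_lr_dataset_py, pvKwLoop, h0, k0, k1, k2, k3]
      cases hf : infos.find? (fun it => pvLooksLikeCube it.2.1 && (pvPrio it.1 == 4)) with
      | none => rw [hf] at hfind; simp at hfind
      | some it0 => rw [hf] at hfind; simpa using hfind
    · have h0 := pred0_none infos 5 hmin (by omega)
      have k0 := kwfind_none infos 5 hmin "lr" 0 (by omega) (by rfl) (by omega)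
      have k1 := kwfind_none infos 5 hmin "low" 1 (by omega) (by rfl) (by omega)
      have k2 := kwfind_none infos 5 hmin "data" 2 (by omega) (by rfl) (by omega)
      have k3 := kwfind_none infos 5 hmin "input" 3 (by omega) (by rfl) (by omega)
      have fb := fallback_eq infos hmin
      simp only [find_lr_dataset_py, pvKwLoop, h0, k0, k1, k2, k3, fb]
      cases hf : infos.find? (fun it => pvLooksLikeCube it.2.1 && (pvPrio it.1 == 5)) with
      | none => rw [hf] at hfind; simp at hfind
      | some it0 => rw [hf] at hfind; simpa using hfind

-- ===== VERDICT (by name: the statement is the Claim_ definition above) =====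
theorem find_lr_dataset_py_spec : Claim_equal_find_lr_dataset_py := by
  intro infos _
  unfold Spec_find_lr_dataset_py
  rw [alt_eq_bestOf, a_eq_bestOf]
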